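-- pv_equiv track=rewrite | github.com/Riyaspn/Bank-affiliate-bot | scripts/scraper.py | best_link
-- ===== SOURCE A (Python) =====
-- def best_link(links):
--     if not links:
--         return ""
--     official = [l.get("url") for l in links if l.get("type") == "official" and l.get("url")]
--     if official:
--         return official[0] if isinstance(official, list) else official
--     for l in links:
--         if l.get("url"):
--             return l["url"]
--     return ""
-- ===== SOURCE B (Python) =====
-- def best_link(links):
--     first_official = None
--     first_any = None
--     for l in links:
--         url = l.get("url")
--         if not url:
--             continue
--         if first_official is None and l.get("type") == "official":
--             first_official = url
--         if first_any is None: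
--             first_any = url
--     if first_official is not None:
--         return first_official
--     if first_any is not None:
--         return first_any
--     return ""
-- ===== Notes on version B (the rewrite author's own statement) =====
-- stated objective: simpler
-- what changed: One pass tracking first_official and first_any instead of building the official list plus a second loop; the dead isinstance branch is dropped.
import Mathlib
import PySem

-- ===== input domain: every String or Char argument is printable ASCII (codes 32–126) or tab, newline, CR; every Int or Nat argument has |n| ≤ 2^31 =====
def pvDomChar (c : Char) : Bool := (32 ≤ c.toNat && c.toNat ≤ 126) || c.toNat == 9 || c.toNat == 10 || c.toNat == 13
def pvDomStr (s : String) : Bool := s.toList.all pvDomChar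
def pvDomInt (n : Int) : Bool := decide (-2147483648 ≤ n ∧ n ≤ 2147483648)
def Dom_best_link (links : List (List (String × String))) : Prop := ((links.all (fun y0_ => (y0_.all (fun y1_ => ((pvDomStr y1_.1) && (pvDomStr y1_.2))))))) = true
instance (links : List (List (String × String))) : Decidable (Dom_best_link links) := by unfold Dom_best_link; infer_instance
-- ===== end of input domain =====

-- B replaces A's official-list comprehension plus second loop with one pass tracking
-- first_official / first_any (objective: simpler; the dead isinstance branch is dropped).


-- ===== PORT A =====
-- l.get("url") truthy  ⇔  getD l "url" "" ≠ "" (missing key → None, falsy, same as "")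
def pvUrl (l : List (String × String)) : String := PySem.Dict.getD (PySem.Dict.mk l) "url" ""

def pvOfficialP (l : List (String × String)) : Bool :=
  decide (PySem.Dict.get? (PySem.Dict.mk l) "type" = some "official") && decide (pvUrl l ≠ "")

-- A's final for-loop: first link with truthy url, else ""
def pvLoopA : List (List (String × String)) → String
  | [] => ""
  | l :: rest => if pvUrl l ≠ "" then pvUrl l else pvLoopA rest

def best_link (links : List (List (String × String))) : String :=
  if links.isEmpty then ""
  else
    -- [l.get("url") for l in links if l.get("type") == "official" and l.get("url")]
    let official := (links.filter pvOfficialP).map pvUrl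
    match official with
    | u :: _ => u          -- official[0] (official is always a list, isinstance branch dead)
    | [] => pvLoopA links

-- ===== PORT B =====
def pvStepB (st : Option String × Option String) (l : List (String × String)) :
    Option String × Option String :=
  let url := PySem.Dict.getD (PySem.Dict.mk l) "url" ""
  if url = "" then st
  else
    let fo := if st.1 = none ∧ PySem.Dict.get? (PySem.Dict.mk l) "type" = some "official" then some url else st.1
    let fa := if st.2 = none then some url else st.2
    (fo, fa)

def best_link_alt (links : List (List (String × String))) : String :=
  let st := links.foldl pvStepB (none, none)
  match st.1 with
  | some u => u
  | none =>
    match st.2 with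
    | some u => u
    | none => ""

-- ===== PRECONDITION & SPEC =====
def Spec_best_link (links : List (List (String × String))) (out : String) : Prop := out = best_link_alt links
instance (links : List (List (String × String))) (out : String) : Decidable (Spec_best_link links out) := by unfold Spec_best_link; infer_instance

-- ===== CLAIM (what is proved, stated in full; the proofs are below) =====
def Claim_equal_best_link : Prop := ∀ (links : List (List (String × String))), Dom_best_link links → Spec_best_link links (best_link links)

-- ===== LEMMAS AND PROOFS =====
def pvFinish (st : Option String × Option String) : String :=
  match st.1 with
  | some u => u
  | none =>
    match st.2 with
    | some u => u
    | none => ""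

theorem pvFoldB_char (ls : List (List (String × String))) :
    ∀ fo fa : Option String,
      pvFinish (ls.foldl pvStepB (fo, fa)) =
        match fo with
        | some u => u
        | none =>
          match (ls.filter pvOfficialP).map pvUrl with
          | u :: _ => u
          | [] =>
            match fa with
            | some u => u
            | none => pvLoopA ls := by
  induction ls with
  | nil => intro fo fa; cases fo <;> cases fa <;> rfl
  | cons l rest ih =>
    intro fo fa
    by_cases hu : pvUrl l = ""
    · have hp : pvOfficialP l = false := by
        simp [pvOfficialP, hu]
      simp only [List.foldl_cons, pvStepB, pvUrl] at *
      rw [if_pos hu]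
      rw [ih fo fa]
      cases fo with
      | some u => rfl
      | none =>
        simp [hp, pvLoopA, pvUrl, hu]
    · simp only [List.foldl_cons, pvStepB]
      rw [if_neg (by simpa [pvUrl] using hu)]
      cases fo with
      | some u =>
        simp only []
        rw [ih]
        simp
      | none =>
        by_cases ht : PySem.Dict.get? (PySem.Dict.mk l) "type" = some "official"
        · have hp : pvOfficialP l = true := by simp [pvOfficialP, ht, hu]
          simp only []
          rw [if_pos ⟨trivial, ht⟩]
          rw [ih]
          simp [hp, pvUrl]
        · have hp : pvOfficialP l = false := by simp [pvOfficialP, ht]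
          simp only []
          rw [if_neg (by simp [ht])]
          rw [ih]
          cases fa with
          | some u => simp [hp]
          | none =>
            have hu' : ¬ PySem.Dict.getD (PySem.Dict.mk l) "url" "" = "" := hu
            simp [hp, pvLoopA, pvUrl, hu']

-- ===== VERDICT (by name: the statement is the Claim_ definition above) =====
theorem best_link_spec : Claim_equal_best_link := by
  intro links _
  show best_link links = best_link_alt links
  have hb : best_link_alt links = pvFinish (links.foldl pvStepB (none, none)) := rfl
  rw [hb, pvFoldB_char links none none]
  unfold best_link
  cases links with
  | nil => rfl
  | cons l rest =>
    rw [if_neg (by simp : ¬((l :: rest).isEmpty = true))]
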